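-- pv_equiv track=rewrite | github.com/Awerroes569/codewars | Python/conways_game_of_life.py | shrink_universe
-- ===== SOURCE A (Python) =====
-- def cut_top(universe):
--     while(len(universe)):
--         if not sum(universe[0]):
--             universe=universe[1:]
--         else:
--             break
--     return universe
--
-- def shrink_universe(universe):
--     universe=cut_top(universe)
--     universe.reverse()
--     universe=cut_top(universe)
--     universe.reverse()
--     zipped=list(zip(*universe[:]))
--     zipped=cut_top(zipped)
--     zipped.reverse()
--     zipped=cut_top(zipped)
--     zipped.reverse()
--     unzipped=list(zip(*zipped[:]))
--     return [list(x) for x in unzipped]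
-- ===== SOURCE B (Python) =====
-- def shrink_universe(universe):
--     n = len(universe)
--     rsums = [sum(r) for r in universe]
--     a = 0
--     while a < n and rsums[a] == 0:
--         a += 1
--     if a == n:
--         return []
--     b = n - 1
--     while rsums[b] == 0:
--         b -= 1
--     rows = universe[a:b + 1]
--     w = min(len(r) for r in rows)
--     csums = [sum(r[j] for r in rows) for j in range(w)]
--     c = 0
--     while c < w and csums[c] == 0:
--         c += 1
--     if c == w:
--         return []
--     d = w - 1
--     while csums[d] == 0:
--         d -= 1
--     return [list(r[c:d + 1]) for r in rows]
-- ===== Notes on version B (the rewrite author's own statement) =====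
-- stated objective: alternative
-- what changed: A repeatedly slices/reverses the whole grid and transposes it twice with zip(*...); B computes row sums and column sums, finds the first/last nonzero index in each direction by scanning, and slices each dimension once, never transposing. A can also reverse the caller's list in place; B never mutates (equivalence is about the return value).
import Mathlib
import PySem

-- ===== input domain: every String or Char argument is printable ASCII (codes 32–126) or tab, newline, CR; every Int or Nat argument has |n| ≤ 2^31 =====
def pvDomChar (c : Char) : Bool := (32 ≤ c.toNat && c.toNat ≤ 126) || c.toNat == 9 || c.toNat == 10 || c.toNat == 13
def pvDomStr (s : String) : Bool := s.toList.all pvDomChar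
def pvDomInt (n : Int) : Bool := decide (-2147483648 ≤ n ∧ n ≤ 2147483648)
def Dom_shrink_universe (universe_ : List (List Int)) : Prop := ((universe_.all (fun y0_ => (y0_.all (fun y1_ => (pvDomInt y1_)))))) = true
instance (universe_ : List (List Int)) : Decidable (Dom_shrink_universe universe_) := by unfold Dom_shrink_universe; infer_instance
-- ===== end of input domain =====

-- B replaces A's repeated whole-grid slicing/reversing and double transposition by computing row/column
-- sums and first/last nonzero bounds, then slicing each dimension once (objective: alternative).
-- A may reverse its caller's list in place; B never mutates: the equivalence proved is about the RETURN value only.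

-- ===== PORT A =====

-- cut_top: while the list is nonempty and its first row sums to 0, drop it
def cutTop : List (List Int) → List (List Int)
  | [] => []
  | r :: rs => if r.sum = 0 then cutTop rs else r :: rs

-- minimum length of the member lists (length of the shortest); helper for zip(*...)
def pyMinWidth : List (List Int) → Nat
  | [] => 0
  | [r] => r.length
  | r :: rs@(_ :: _) => min r.length (pyMinWidth rs)

-- exact model of Python's list(zip(*xss)): result j pairs the j-th items, truncated to the shortest
-- member list; zip of no lists is empty (tuples rendered as lists)
def pyZipStar (xss : List (List Int)) : List (List Int) :=
  (List.range (pyMinWidth xss)).map (fun j => xss.map (fun r => r.getD j 0))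

def shrink_universe (universe_ : List (List Int)) : List (List Int) :=
  let u1 := cutTop universe_
  let u2 := (cutTop u1.reverse).reverse
  let z := pyZipStar u2
  let z1 := cutTop z
  let z2 := (cutTop z1.reverse).reverse
  (pyZipStar z2).map (fun x => x)   -- [list(x) for x in unzipped]

-- ===== PORT B =====

-- while i < len(s) and s[i] == 0: i += 1   (count of leading zeros)
def skipZeros : List Int → Nat
  | [] => 0
  | x :: xs => if x = 0 then skipZeros xs + 1 else 0

def shrink_universe_alt (universe_ : List (List Int)) : List (List Int) :=
  let n := universe_.length
  let rsums := universe_.map (fun r => r.sum)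
  let a := skipZeros rsums
  if a = n then []
  else
    -- backwards scan `while rsums[b] == 0: b -= 1` = n - 1 - (leading zeros of the reverse);
    -- exact: a nonzero entry exists (a < n), so the scan stops inside the list
    let b := n - 1 - skipZeros rsums.reverse
    let rows := (universe_.drop a).take (b + 1 - a)   -- universe[a:b+1], 0 ≤ a ≤ b < n: exact
    let w := pyMinWidth rows                          -- min(len(r) for r in rows), rows nonempty
    let csums := (List.range w).map (fun j => (rows.map (fun r => r.getD j 0)).sum)
    let c := skipZeros csums
    if c = w then []
    else
      let d := w - 1 - skipZeros csums.reverse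
      rows.map (fun r => (r.drop c).take (d + 1 - c)) -- [list(r[c:d+1]) for r in rows]

-- ===== PRECONDITION & SPEC =====
def Spec_shrink_universe (universe_ : List (List Int)) (out : List (List Int)) : Prop := out = shrink_universe_alt universe_
instance (universe_ : List (List Int)) (out : List (List Int)) : Decidable (Spec_shrink_universe universe_ out) := by unfold Spec_shrink_universe; infer_instance

-- ===== CLAIM (what is proved, stated in full; the proofs are below) =====
def Claim_equal_shrink_universe : Prop := ∀ (universe_ : List (List Int)), Dom_shrink_universe universe_ → Spec_shrink_universe universe_ (shrink_universe universe_)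


-- ===== LEMMAS AND PROOFS =====

-- "this row/column is all blank": its sum is 0
def zrow : List Int -> Bool := fun r => decide (r.sum = 0)

theorem cutTop_eq_dropWhile (l : List (List Int)) :
    cutTop l = l.dropWhile zrow := by
  induction l with
  | nil => rfl
  | cons r rs ih => by_cases h : r.sum = 0 <;> simp [cutTop, zrow, h, ih]

theorem skipZeros_eq (s : List Int) :
    skipZeros s = (s.takeWhile (fun x => decide (x = 0))).length := by
  induction s with
  | nil => rfl
  | cons x xs ih => by_cases h : x = 0 <;> simp [skipZeros, h, ih]

theorem dropWhile_eq_drop {a : Type} (p : a -> Bool) (l : List a) :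
    l.dropWhile p = l.drop (l.takeWhile p).length := by
  induction l with
  | nil => rfl
  | cons x xs ih => by_cases h : p x <;> simp [h, ih]

theorem length_takeWhile_le' {a : Type} (p : a -> Bool) (l : List a) :
    (l.takeWhile p).length <= l.length :=
  (List.takeWhile_prefix p).length_le

theorem getElem_takeWhile_false {a : Type} (p : a -> Bool) (l : List a)
    (h : (l.takeWhile p).length < l.length) :
    p (l[(l.takeWhile p).length]'h) = false := by
  induction l with
  | nil => simp at h
  | cons x xs ih =>
    by_cases hx : p x
    · simpa [List.takeWhile_cons, hx] using ih (by simpa [List.takeWhile_cons, hx] using h)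
    · simp [List.takeWhile_cons, hx]

theorem takeWhile_getElem_true {a : Type} (p : a -> Bool) (l : List a) (i : Nat)
    (h : i < (l.takeWhile p).length) :
    p (l[i]'(lt_of_lt_of_le h (length_takeWhile_le' p l))) = true := by
  have hmem : (l.takeWhile p)[i] ∈ l.takeWhile p := List.getElem_mem h
  have hpe : (l.takeWhile p)[i] = l[i]'(lt_of_lt_of_le h (length_takeWhile_le' p l)) :=
    (List.takeWhile_prefix p).getElem h
  have := List.mem_takeWhile_imp hmem
  rwa [hpe] at this

theorem reverse_drop_reverse {a : Type} (v : List a) (k : Nat) :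
    (v.reverse.drop k).reverse = v.take (v.length - k) := by
  rw [List.reverse_drop]
  simp

theorem trim_all_zero (l : List (List Int))
    (h : (l.takeWhile zrow).length = l.length) :
    (cutTop ((cutTop l).reverse)).reverse = [] := by
  simp only [cutTop_eq_dropWhile, dropWhile_eq_drop]
  rw [h, List.drop_length]
  simp

theorem trim_bound (l : List (List Int))
    (h : (l.takeWhile zrow).length < l.length) :
    (l.reverse.takeWhile zrow).length + (l.takeWhile zrow).length < l.length := by
  set p : List Int -> Bool := zrow with hp
  set a := (l.takeWhile p).length with ha
  set t := (l.reverse.takeWhile p).length with ht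
  by_contra hcon
  rw [not_lt] at hcon
  have htle : t <= l.length := by
    simpa using length_takeWhile_le' p l.reverse
  have hi : l.length - 1 - a < t := by omega
  have htrue := takeWhile_getElem_true p l.reverse (l.length - 1 - a) hi
  rw [List.getElem_reverse] at htrue
  have hidx : l.length - 1 - (l.length - 1 - a) = a := by omega
  simp only [hidx] at htrue
  have hfalse' : p (l[a]'h) = false := getElem_takeWhile_false p l h
  have : (true : Bool) = false := htrue.symm.trans hfalse'
  simp at this

theorem trim_slice (l : List (List Int))
    (h : (l.takeWhile zrow).length < l.length) :
    (cutTop ((cutTop l).reverse)).reverse =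
      (l.drop (l.takeWhile zrow).length).take
        (l.length - (l.reverse.takeWhile zrow).length - (l.takeWhile zrow).length) := by
  have hat := trim_bound l h
  set p : List Int -> Bool := zrow with hp
  set a := (l.takeWhile p).length with ha
  set t := (l.reverse.takeWhile p).length with ht
  simp only [cutTop_eq_dropWhile, dropWhile_eq_drop]
  have hvrev : (List.drop a l).reverse = List.take (l.length - a) l.reverse :=
    List.reverse_drop
  have htw : (List.takeWhile p (List.drop a l).reverse).length = t := by
    rw [hvrev, ← List.take_takeWhile]
    simp only [List.length_take, ← ht]
    omega
  rw [htw, reverse_drop_reverse]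
  have hlen : (List.drop a l).length - t = l.length - t - a := by
    simp only [List.length_drop]
    omega
  rw [hlen]

theorem pyMinWidth_le (l : List (List Int)) (r : List Int) (h : r ∈ l) :
    pyMinWidth l <= r.length := by
  induction l with
  | nil => simp at h
  | cons x xs ih =>
    cases xs with
    | nil => simp at h; simp [h, pyMinWidth]
    | cons y ys =>
      rcases List.mem_cons.mp h with h1 | h2
      · simp [pyMinWidth, h1]
      · simp only [pyMinWidth]
        exact le_trans (min_le_right _ _) (ih h2)

theorem pyMinWidth_const (l : List (List Int)) (m : Nat) (hne : l ≠ [])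
    (h : ∀ x ∈ l, x.length = m) : pyMinWidth l = m := by
  induction l with
  | nil => simp at hne
  | cons x xs ih =>
    cases xs with
    | nil => simpa [pyMinWidth] using h x (by simp)
    | cons y ys =>
      have hx : x.length = m := h x (by simp)
      have hrec : pyMinWidth (y :: ys) = m :=
        ih (by simp) (fun z hz => h z (List.mem_cons_of_mem _ hz))
      simp [pyMinWidth, hx, hrec]

theorem skipZeros_sums (v : List (List Int)) :
    skipZeros (v.map (fun r => r.sum)) = (v.takeWhile zrow).length := by
  rw [skipZeros_eq, List.takeWhile_map, List.length_map]
  rfl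

theorem skipZeros_sums_rev (v : List (List Int)) :
    skipZeros ((v.map (fun r => r.sum)).reverse) = (v.reverse.takeWhile zrow).length := by
  rw [← List.map_reverse, skipZeros_sums]

theorem zip_slice (R : List (List Int)) (c k : Nat) (hk : 1 <= k) (hckw : c + k <= pyMinWidth R) :
    pyZipStar (((pyZipStar R).drop c).take k) = R.map (fun r => (r.drop c).take k) := by
  have hwle : ∀ r ∈ R, pyMinWidth R <= r.length := fun r hr => pyMinWidth_le R r hr
  have hzlen : (pyZipStar R).length = pyMinWidth R := by simp [pyZipStar]
  have hz2len : (((pyZipStar R).drop c).take k).length = k := by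
    simp only [List.length_take, List.length_drop, hzlen]
    omega
  have hzmem : ∀ x ∈ pyZipStar R, x.length = R.length := by
    intro x hx
    simp only [pyZipStar, List.mem_map, List.mem_range] at hx
    obtain ⟨j, hj, rfl⟩ := hx
    simp
  have hz2mem : ∀ x ∈ ((pyZipStar R).drop c).take k, x.length = R.length := fun x hx =>
    hzmem x (List.mem_of_mem_drop (List.mem_of_mem_take hx))
  have hz2ne : ((pyZipStar R).drop c).take k ≠ [] := by
    intro h0
    rw [h0] at hz2len
    simp at hz2len
    omega
  have hmw : pyMinWidth (((pyZipStar R).drop c).take k) = R.length :=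
    pyMinWidth_const _ _ hz2ne hz2mem
  show (List.range (pyMinWidth (((pyZipStar R).drop c).take k))).map _ = _
  rw [hmw]
  apply List.ext_getElem
  · simp
  · intro i h1 h2
    simp only [List.getElem_map, List.getElem_range]
    apply List.ext_getElem
    · have hiR : i < R.length := by simpa using h2
      have hle : pyMinWidth R <= R[i].length := hwle _ (List.getElem_mem hiR)
      simp only [List.length_map, hz2len, List.length_take, List.length_drop]
      omega
    · intro j hj1 hj2
      have hjk : j < k := by
        rw [List.length_map, hz2len] at hj1
        exact hj1
      have hiR : i < R.length := by simpa using h2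
      have hcjr : c + j < R[i].length := by
        have := hwle _ (List.getElem_mem hiR)
        omega
      simp only [List.getElem_map, List.getElem_take, List.getElem_drop]
      simp only [pyZipStar, List.getElem_map, List.getElem_range]
      rw [List.getD_eq_getElem _ _ (by simpa using hiR), List.getElem_map,
        List.getD_eq_getElem _ _ hcjr]

-- ===== VERDICT =====
theorem shrink_universe_spec : Claim_equal_shrink_universe := by
  intro u _
  unfold Spec_shrink_universe
  show shrink_universe u = shrink_universe_alt u
  simp only [shrink_universe, shrink_universe_alt]
  rw [skipZeros_sums u, skipZeros_sums_rev u]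
  by_cases hA : (u.takeWhile zrow).length = u.length
  · rw [if_pos hA, trim_all_zero u hA]
    simp [pyZipStar, pyMinWidth, cutTop]
  · rw [if_neg hA]
    have hA' : (u.takeWhile zrow).length < u.length :=
      lt_of_le_of_ne (length_takeWhile_le' zrow u) hA
    have hat := trim_bound u hA'
    rw [trim_slice u hA']
    set a := (u.takeWhile zrow).length with ha
    set t := (u.reverse.takeWhile zrow).length with ht
    rw [show u.length - 1 - t + 1 - a = u.length - t - a from by omega]
    set R := List.take (u.length - t - a) (List.drop a u) with hR
    have hRlen : R.length = u.length - t - a := by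
      rw [hR]
      simp only [List.length_take, List.length_drop]
      omega
    have hcs : (List.range (pyMinWidth R)).map (fun j => (R.map (fun r => r.getD j 0)).sum) =
        (pyZipStar R).map (fun r => r.sum) := by
      simp [pyZipStar, List.map_map]
    rw [hcs, skipZeros_sums (pyZipStar R), skipZeros_sums_rev (pyZipStar R)]
    have hzlen : (pyZipStar R).length = pyMinWidth R := by simp [pyZipStar]
    by_cases hC : ((pyZipStar R).takeWhile zrow).length = pyMinWidth R
    · rw [if_pos hC, trim_all_zero (pyZipStar R) (by rw [hzlen]; exact hC)]
      simp [pyZipStar, pyMinWidth]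
    · rw [if_neg hC]
      have hC' : ((pyZipStar R).takeWhile zrow).length < (pyZipStar R).length := by
        rw [hzlen]
        exact lt_of_le_of_ne (hzlen ▸ length_takeWhile_le' zrow (pyZipStar R)) hC
      have hat' := trim_bound (pyZipStar R) hC'
      rw [hzlen] at hat'
      rw [trim_slice (pyZipStar R) hC', hzlen]
      set c := ((pyZipStar R).takeWhile zrow).length with hc
      set t' := ((pyZipStar R).reverse.takeWhile zrow).length with ht'
      rw [show pyMinWidth R - 1 - t' + 1 - c = pyMinWidth R - t' - c from by omega]
      have := zip_slice R c (pyMinWidth R - t' - c) (by omega) (by omega)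
      simpa using this
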